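-- pv_equiv track=rewrite | github.com/sanupanji/python | function_exercises/function10.py | sum_69
-- ===== SOURCE A (Python) =====
-- def sum_69(lst):
--     sume = 0
--     index = -1
--     c = 0
--     for i in lst:
--         if lst.index(i, c) > index:
--             if i == 6:
--                 index = lst.index(9, c)
--
--             else:
--                 sume += i
--         c += 1
--     return sume
-- ===== SOURCE B (Python) =====
-- def sum_69(lst):
--     total = 0
--     skip = False
--     for x in lst:
--         if skip:
--             if x == 9:
--                 skip = False
--         elif x == 6:
--             skip = True
--         else:
--             total += x
--     return total
-- ===== Notes on version B (the rewrite author's own statement) =====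
-- stated objective: simpler
-- what changed: Replaced the repeated list.index scans and the numeric index/position bookkeeping by a single pass with a boolean skip flag set on 6 and cleared on the next 9.
import Mathlib
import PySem

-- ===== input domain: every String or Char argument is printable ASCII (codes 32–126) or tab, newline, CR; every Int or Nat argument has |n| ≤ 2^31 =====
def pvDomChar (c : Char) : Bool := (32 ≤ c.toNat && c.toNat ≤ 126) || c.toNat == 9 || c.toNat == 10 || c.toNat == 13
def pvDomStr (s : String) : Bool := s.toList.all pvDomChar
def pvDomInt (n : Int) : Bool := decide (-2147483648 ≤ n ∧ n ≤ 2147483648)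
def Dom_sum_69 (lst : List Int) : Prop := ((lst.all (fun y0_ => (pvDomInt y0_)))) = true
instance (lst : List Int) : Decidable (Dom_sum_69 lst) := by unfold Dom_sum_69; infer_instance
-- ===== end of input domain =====

-- B replaces A's repeated list.index scans and index bookkeeping by a single pass with a boolean skip flag.


-- ===== PORT A =====
-- One iteration of A's loop; state = (sume, index, c), c is the running position.
-- Python's lst.index(i, c) = c + first index of i in lst[c:]; the first call always
-- finds i (i is lst[c], so `.getD 0` is never taken); the second (lst.index(9, c))
-- raises ValueError exactly when PySem.List.index? returns none — those inputs are
-- excluded by Pre_sum_69 (the `none` branch value is irrelevant there).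
def sum69StepA (lst : List Int) (st : Int × Int × Nat) (i : Int) : Int × Int × Nat :=
  if (((PySem.List.index? (lst.drop st.2.2) i).getD 0 : Int) + st.2.2) > st.2.1 then
    if i = 6 then
      (st.1,
       (match PySem.List.index? (lst.drop st.2.2) 9 with
        | some j => (j : Int) + st.2.2
        | none => st.2.1),
       st.2.2 + 1)
    else (st.1 + i, st.2.1, st.2.2 + 1)
  else (st.1, st.2.1, st.2.2 + 1)

def sum_69 (lst : List Int) : Int :=
  (lst.foldl (sum69StepA lst) (0, -1, 0)).1

-- ===== PORT B =====
-- One iteration of B's loop; state = (total, skip).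
def sum69StepB (st : Int × Bool) (x : Int) : Int × Bool :=
  if st.2 then (if x = 9 then (st.1, false) else st)
  else if x = 6 then (st.1, true)
  else (st.1 + x, st.2)

def sum_69_alt (lst : List Int) : Int :=
  (lst.foldl sum69StepB (0, false)).1

-- ===== PRECONDITION & SPEC =====
-- Pre_ excludes exactly the inputs where A raises ValueError: lists containing a 6
-- with no 9 at or after it (then lst.index(9, c) fails).
def Pre_sum_69 (lst : List Int) : Prop :=
  ∀ i : Nat, i < lst.length → lst.getD i 0 = 6 →
    ∃ j : Nat, j < lst.length ∧ i ≤ j ∧ lst.getD j 0 = 9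

instance (lst : List Int) : Decidable (Pre_sum_69 lst) := by unfold Pre_sum_69; infer_instance

def pvWitness_sum_69 : List Int := [1, 6, 2, 9, 3]

def Spec_sum_69 (lst : List Int) (out : Int) : Prop := out = sum_69_alt lst
instance (lst : List Int) (out : Int) : Decidable (Spec_sum_69 lst out) := by unfold Spec_sum_69; infer_instance

-- ===== CLAIM (what is proved, stated in full; the proofs are below) =====
def Claim_equal_sum_69 : Prop := ∀ (lst : List Int), Dom_sum_69 lst → Pre_sum_69 lst → Spec_sum_69 lst (sum_69 lst)

-- ===== LEMMAS AND PROOFS =====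

-- Invariant tying A's loop state (index, at position k) to B's skip flag:
-- skip is set exactly when index points at the first 9 of the remaining suffix l.
def SkipInv (k : Nat) (index : Int) (skip : Bool) (l : List Int) : Prop :=
  if skip then ∃ m : Nat, index = (k : Int) + m ∧ PySem.List.index? l 9 = some m
  else index < (k : Int)

lemma sum69_loop_eq (lst : List Int) (hPre : Pre_sum_69 lst) :
    ∀ (l pre : List Int), pre ++ l = lst →
    ∀ (sume index : Int) (skip : Bool), SkipInv pre.length index skip l →
    (List.foldl (sum69StepA lst) (sume, index, pre.length) l).1 =
      (List.foldl sum69StepB (sume, skip) l).1 := by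
  intro l
  induction l with
  | nil => intro pre h sume index skip hInv; rfl
  | cons x l' ih =>
    intro pre h sume index skip hInv
    have hdrop : lst.drop pre.length = x :: l' := by
      rw [← h, List.drop_left]
    have happ : (pre ++ [x]) ++ l' = lst := by simpa [List.append_assoc] using h
    have hlen : (pre ++ [x]).length = pre.length + 1 := by simp
    have hself : PySem.List.index? (lst.drop pre.length) x = some 0 :=
      by rw [hdrop]; exact PySem.List.index?_cons_self ..
    rw [List.foldl_cons, List.foldl_cons]
    cases skip with
    | true =>
      obtain ⟨m, him, hm⟩ : ∃ m : Nat,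
          index = (pre.length : Int) + m ∧ PySem.List.index? (x :: l') 9 = some m := by
        simpa [SkipInv] using hInv
      have hstepA : sum69StepA lst (sume, index, pre.length) x
          = (sume, index, pre.length + 1) := by
        simp only [sum69StepA, hself, Option.getD_some, Nat.cast_zero, zero_add]
        rw [if_neg (by omega)]
      rw [hstepA]
      by_cases hx9 : x = 9
      · subst hx9
        have hm0 : m = 0 := by
          rw [PySem.List.index?_cons_self] at hm
          exact (Option.some.inj hm).symm
        have hB : sum69StepB (sume, true) 9 = (sume, false) := by simp [sum69StepB]
        rw [hB]
        have := ih (pre ++ [9]) happ sume index false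
          (by simp [SkipInv, hlen]; omega)
        simpa [hlen] using this
      · obtain ⟨m', hidx', hmm⟩ : ∃ m', PySem.List.index? l' 9 = some m' ∧ m = m' + 1 := by
          rw [PySem.List.index?_cons_of_ne l' hx9] at hm
          cases hidx : PySem.List.index? l' 9 with
          | none => rw [hidx] at hm; simp at hm
          | some m' =>
            rw [hidx] at hm; simp at hm
            exact ⟨m', rfl, by omega⟩
        have hB : sum69StepB (sume, true) x = (sume, true) := by simp [sum69StepB, hx9]
        rw [hB]
        have := ih (pre ++ [x]) happ sume index true
          (by simp only [SkipInv, if_true, hlen]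
              exact ⟨m', by push_cast; omega, hidx'⟩)
        simpa [hlen] using this
    | false =>
      have hlt : index < (pre.length : Int) := by simpa [SkipInv] using hInv
      by_cases hx6 : x = 6
      · subst hx6
        have hklen : pre.length < lst.length := by rw [← h]; simp
        have hgetk : lst.getD pre.length 0 = 6 := by
          rw [← h, List.getD_eq_getElem?_getD, List.getElem?_append_right (le_refl _)]
          simp
        obtain ⟨j, hj, hkj, hj9⟩ := hPre pre.length hklen hgetk
        have hj9' : lst[j]? = some 9 := by
          rw [List.getD_eq_getElem?_getD] at hj9
          cases hq : lst[j]? with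
          | none => rw [List.getElem?_eq_none_iff] at hq; omega
          | some v =>
            rw [hq] at hj9; simp at hj9
            rw [hj9]
        have hmem : (9 : Int) ∈ (6 : Int) :: l' := by
          rw [← hdrop]
          have hdj : (lst.drop pre.length)[j - pre.length]? = some 9 := by
            rw [List.getElem?_drop, Nat.add_sub_cancel' hkj]
            exact hj9'
          exact List.mem_of_getElem? hdj
        obtain ⟨m, hm⟩ : ∃ m, PySem.List.index? ((6 : Int) :: l') 9 = some m :=
          Option.isSome_iff_exists.mp
            ((PySem.List.index?_isSome_iff (xs := (6 : Int) :: l') (v := 9)).mpr hmem)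
        obtain ⟨m', hidx', hmm⟩ : ∃ m', PySem.List.index? l' 9 = some m' ∧ m = m' + 1 := by
          rw [PySem.List.index?_cons_of_ne l' (by decide)] at hm
          cases hidx : PySem.List.index? l' 9 with
          | none => rw [hidx] at hm; simp at hm
          | some m' =>
            rw [hidx] at hm; simp at hm
            exact ⟨m', rfl, by omega⟩
        have hstepA : sum69StepA lst (sume, index, pre.length) (6 : Int)
            = (sume, (m : Int) + pre.length, pre.length + 1) := by
          simp only [sum69StepA, hself, Option.getD_some, Nat.cast_zero, zero_add]
          rw [if_pos (by omega)]
          simp only [if_true]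
          rw [hdrop, hm]
        have hB : sum69StepB (sume, false) (6 : Int) = (sume, true) := by simp [sum69StepB]
        rw [hstepA, hB]
        have := ih (pre ++ [(6 : Int)]) happ sume ((m : Int) + pre.length) true
          (by simp only [SkipInv, if_true, hlen]
              exact ⟨m', by push_cast; omega, hidx'⟩)
        simpa [hlen] using this
      · have hstepA : sum69StepA lst (sume, index, pre.length) x
            = (sume + x, index, pre.length + 1) := by
          simp only [sum69StepA, hself, Option.getD_some, Nat.cast_zero, zero_add]
          rw [if_pos (by omega), if_neg hx6]
        have hB : sum69StepB (sume, false) x = (sume + x, false) := by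
          simp [sum69StepB, hx6]
        rw [hstepA, hB]
        have := ih (pre ++ [x]) happ (sume + x) index false
          (by simp [SkipInv, hlen]; omega)
        simpa [hlen] using this

theorem sum_69_spec : Claim_equal_sum_69 := by
  intro lst _ hPre
  unfold Spec_sum_69 sum_69 sum_69_alt
  exact sum69_loop_eq lst hPre lst [] rfl 0 (-1) false (by simp [SkipInv])
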